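-- pv_equiv track=rewrite | github.com/Sudip2708/Python-Exercises | !Cvičení/13_04 [součtu řádků 2D tabulky - hodnoty].py | zoznam_suctov
-- ===== SOURCE A (Python) =====
-- def secti(sez):                     #dedfinice rekurzivní funkce (parametr - neprázdný seznamú)
--     if len(sez) == 1:                   #pokud má seznam (už) jen jednu položku
--         return sez[0]                       #vrať tuto položku
--     return sez[0] + secti(sez[1:])      #návratová hodnota - seznam poniž o první položku a znovu volej + hodnoty přičti k poslední položce
--
-- def zoznam_suctov(tab):             #definice funkce pro součet obsahu řádků dvojrozměrné tabulky
--     vysledek = []                       #proměnná pro výsledný seznam hodnot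
--     for radek in tab:                   #cyklus - pro každý řádek ze seznamu tabulky
--         if len(radek) == 0:                 #pokud je řádek prázdný
--             vysledek.append(None)               #přidej do seznamu 'vysledek' hodnotu 'None'
--         else:                               #pokud řádek není prázdný
--             vysledek.append(secti(radek))       #přidej do seznamu 'vysledek' výsledek volání rekurzivní funkce 'secti'
--     return vysledek                     #návratová hodnota - seznam 'vysledek'
-- ===== SOURCE B (Python) =====
-- def zoznam_suctov(tab):
--     vysledek = []
--     for radek in tab:
--         if len(radek) == 0:
--             vysledek.append(None)
--         else:
--             acc = radek[-1]
--             for x in reversed(radek[:-1]):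
--                 acc = x + acc
--             vysledek.append(acc)
--     return vysledek
-- ===== Notes on version B (the rewrite author's own statement) =====
-- stated objective: faster
-- what changed: Replaces the recursive helper secti (which copies the tail by slicing on every call) with an inline right-to-left iterative accumulator seeded from the row's last element, preserving the same right-associated addition order.
import Mathlib
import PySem

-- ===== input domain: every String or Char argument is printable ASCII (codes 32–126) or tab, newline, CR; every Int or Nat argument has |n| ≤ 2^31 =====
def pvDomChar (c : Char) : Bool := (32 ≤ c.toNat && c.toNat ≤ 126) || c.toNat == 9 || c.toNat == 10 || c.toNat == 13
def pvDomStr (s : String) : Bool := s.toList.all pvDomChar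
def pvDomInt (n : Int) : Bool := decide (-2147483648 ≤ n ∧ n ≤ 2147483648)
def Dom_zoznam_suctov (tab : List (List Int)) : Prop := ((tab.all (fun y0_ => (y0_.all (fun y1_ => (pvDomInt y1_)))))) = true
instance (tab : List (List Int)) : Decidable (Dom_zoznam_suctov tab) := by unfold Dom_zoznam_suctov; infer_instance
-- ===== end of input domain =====

-- ===== PORT A =====
-- B inlines A's recursive right-associated sum (which slices the row on every call) into an iterative accumulator; objective: faster (measured).
-- secti is A's recursive helper; A never calls it on [], so the [] case (Python: IndexError) is an
-- arbitrary unreachable value.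
def secti : List Int → Int
  | [] => 0
  | [x] => x
  | x :: y :: t => x + secti (y :: t)

def zoznam_suctov (tab : List (List Int)) : List (Option Int) :=
  tab.foldl (fun vysledek radek =>
    if radek.length = 0 then vysledek ++ [none]
    else vysledek ++ [some (secti radek)]) []

-- ===== PORT B =====
-- radek[-1] on a nonempty list is its last element (getLast!); radek[:-1] is dropLast;
-- reversed(…) with acc = x + acc is the foldl over the reversed prefix.
def zoznam_suctov_alt (tab : List (List Int)) : List (Option Int) :=
  tab.foldl (fun vysledek radek =>
    if radek.length = 0 then vysledek ++ [none]
    else vysledek ++ [some (radek.dropLast.reverse.foldl (fun acc x => x + acc) radek.getLast!)]) []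

-- ===== PRECONDITION & SPEC =====
def Spec_zoznam_suctov (tab : List (List Int)) (out : List (Option Int)) : Prop := out = zoznam_suctov_alt tab
instance (tab : List (List Int)) (out : List (Option Int)) : Decidable (Spec_zoznam_suctov tab out) := by unfold Spec_zoznam_suctov; infer_instance

-- ===== CLAIM (what is proved, stated in full; the proofs are below) =====
def Claim_equal_zoznam_suctov : Prop := ∀ (tab : List (List Int)), Dom_zoznam_suctov tab → Spec_zoznam_suctov tab (zoznam_suctov tab)

-- ===== LEMMAS AND PROOFS =====
theorem secti_eq_loop : ∀ (l : List Int), l ≠ [] →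
    secti l = l.dropLast.reverse.foldl (fun acc x => x + acc) l.getLast! := by
  intro l
  induction l with
  | nil => intro h; exact absurd rfl h
  | cons x t ih =>
    intro _
    cases t with
    | nil => simp [secti, List.getLast!]
    | cons y t' =>
      have h2 : secti (y :: t') = (y :: t').dropLast.reverse.foldl (fun acc x => x + acc) (y :: t').getLast! :=
        ih (by simp)
      simp only [secti, h2, List.dropLast_cons_of_ne_nil (l := y :: t') (by simp),
        List.reverse_cons, List.foldl_append, List.foldl_cons, List.foldl_nil]
      rfl

theorem step_eq (vysledek : List (Option Int)) (radek : List Int) :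
    (if radek.length = 0 then vysledek ++ [none] else vysledek ++ [some (secti radek)]) =
    (if radek.length = 0 then vysledek ++ [none]
     else vysledek ++ [some (radek.dropLast.reverse.foldl (fun acc x => x + acc) radek.getLast!)]) := by
  by_cases h : radek.length = 0
  · simp [h]
  · simp only [if_neg h]
    rw [secti_eq_loop radek (by intro hn; exact h (by simp [hn]))]

-- ===== VERDICT (by name: the statement is the Claim_ definition above) =====
theorem zoznam_suctov_spec : Claim_equal_zoznam_suctov := by
  intro tab _
  unfold Spec_zoznam_suctov zoznam_suctov zoznam_suctov_alt
  exact PySem.List.foldl_congr_mem _ _ _ _ (fun vys radek _ => step_eq vys radek)
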